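-- pv_equiv track=rewrite | github.com/sushma8328/pythontest | strings.py | decimal_num
-- ===== SOURCE A (Python) =====
-- def decimal_num(n):
-- 	number = 8
-- 	l = []
-- 	while(n > 0):
-- 		l.append(n % number)
-- 		n = n//number
-- 	l.reverse()
-- 	return l
-- ===== SOURCE B (Python) =====
-- def decimal_num(n):
--     if n <= 0:
--         return []
--     p = 1
--     while p * 8 <= n:
--         p *= 8
--     digits = []
--     while p >= 1:
--         digits.append(n // p)
--         n = n % p
--         p = p // 8
--     return digits
-- ===== Notes on version B (the rewrite author's own statement) =====
-- stated objective: alternative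
-- what changed: Instead of collecting remainders least-significant-first and reversing, B first finds the largest octal place value not exceeding n and then extracts digits most-significant-first by division by descending place values, so no list reversal is needed.
import Mathlib
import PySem

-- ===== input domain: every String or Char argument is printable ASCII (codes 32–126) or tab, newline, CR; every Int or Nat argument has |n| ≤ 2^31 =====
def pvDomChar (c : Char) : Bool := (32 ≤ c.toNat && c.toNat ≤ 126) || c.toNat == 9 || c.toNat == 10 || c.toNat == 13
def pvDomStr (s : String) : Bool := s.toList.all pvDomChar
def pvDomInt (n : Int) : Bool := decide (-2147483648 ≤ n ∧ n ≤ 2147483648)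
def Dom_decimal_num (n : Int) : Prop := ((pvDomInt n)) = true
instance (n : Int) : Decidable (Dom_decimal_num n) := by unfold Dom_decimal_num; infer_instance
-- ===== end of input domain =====

-- B finds the largest octal place value not exceeding n first, then extracts digits
-- most-significant-first by division by descending place values, so no reversal is needed
-- (alternative algorithm).


-- ===== PORT A =====
-- the while loop of A: state is (n, l); appends n % 8, replaces n by n // 8.
-- 'fuel' is a totality guard only: n strictly decreases each iteration, so
-- fuel = n.toNat + 1 never runs out before the loop condition fails.
def decimal_num_loop (fuel : Nat) (n : Int) (l : List Int) : List Int :=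
  match fuel with
  | 0 => l
  | f + 1 =>
    if 0 < n then
      decimal_num_loop f (PySem.Int.floordiv n 8) (l ++ [PySem.Int.mod n 8])
    else l

def decimal_num (n : Int) : List Int :=
  (decimal_num_loop (n.toNat + 1) n []).reverse

-- ===== PORT B =====
-- first while loop of B: grow p by factors of 8 while p*8 ≤ n (fuel = totality guard)
def decimal_num_pow (fuel : Nat) (n p : Int) : Int :=
  match fuel with
  | 0 => p
  | f + 1 => if p * 8 ≤ n then decimal_num_pow f n (p * 8) else p

-- second while loop of B: peel the leading digit n // p, keep n % p, shrink p (fuel = totality guard)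
def decimal_num_dig (fuel : Nat) (n p : Int) (digits : List Int) : List Int :=
  match fuel with
  | 0 => digits
  | f + 1 =>
    if 1 ≤ p then
      decimal_num_dig f (PySem.Int.mod n p) (PySem.Int.floordiv p 8) (digits ++ [PySem.Int.floordiv n p])
    else digits

def decimal_num_alt (n : Int) : List Int :=
  if n ≤ 0 then []
  else
    let p := decimal_num_pow (n.toNat + 1) n 1
    decimal_num_dig (p.toNat + 1) n p []

-- ===== PRECONDITION & SPEC =====
def Spec_decimal_num (n : Int) (out : List Int) : Prop := out = decimal_num_alt n
instance (n : Int) (out : List Int) : Decidable (Spec_decimal_num n out) := by unfold Spec_decimal_num; infer_instance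

-- ===== CLAIM =====
def Claim_equal_decimal_num : Prop := ∀ (n : Int), Dom_decimal_num n → Spec_decimal_num n (decimal_num n)

-- ===== LEMMAS AND PROOFS =====

-- canonical most-significant-first digit list (proof-side helper only)
def msd (n : Int) : List Int :=
  if n ≤ 0 then []
  else msd (n / 8) ++ [n % 8]
termination_by n.toNat
decreasing_by rename_i h; omega

-- A's reversed loop equals msd whenever the fuel dominates n
theorem loop_reverse (fuel : Nat) : ∀ (n : Int), n.toNat < fuel → ∀ (l : List Int),
    (decimal_num_loop fuel n l).reverse = msd n ++ l.reverse := by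
  induction fuel with
  | zero => intro n hn; omega
  | succ f ih =>
    intro n hn l
    by_cases h : 0 < n
    · have h8 : PySem.Int.floordiv n 8 = n / 8 := PySem.Int.floordiv_eq_ediv_of_pos (by omega)
      have hm : PySem.Int.mod n 8 = n % 8 := PySem.Int.mod_eq_emod_of_pos (by omega)
      rw [decimal_num_loop, if_pos h, ih _ (by rw [h8]; omega)]
      conv_rhs => rw [msd, if_neg (by omega)]
      simp
    · rw [decimal_num_loop, if_neg h, msd, if_pos (by omega)]
      simp

-- fixed-width MSB-first digit list: pad k n has k+1 entries
def pad : Nat → Int → List Int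
  | 0, n => [n]
  | k+1, n => n / 8 ^ (k + 1) :: pad k (n % 8 ^ (k + 1))

-- the power loop returns the exact bracketing power of 8
theorem pow_spec (fuel : Nat) : ∀ (n p : Int), (n - p).toNat < fuel → 1 ≤ p → p ≤ n →
    ∃ k : Nat, decimal_num_pow fuel n p = p * 8 ^ k ∧
      decimal_num_pow fuel n p ≤ n ∧ n < 8 * decimal_num_pow fuel n p := by
  induction fuel with
  | zero => intro n p hf; omega
  | succ f ih =>
    intro n p hf hp hpn
    by_cases h : p * 8 ≤ n
    · obtain ⟨k, hk, hle, hlt⟩ := ih n (p * 8) (by omega) (by omega) (by omega)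
      have hrw : decimal_num_pow (f + 1) n p = decimal_num_pow f n (p * 8) := by
        rw [decimal_num_pow, if_pos h]
      exact ⟨k + 1, by rw [hrw, hk]; ring, by rw [hrw]; exact hle, by rw [hrw]; exact hlt⟩
    · refine ⟨0, ?_, ?_, ?_⟩ <;> rw [decimal_num_pow, if_neg h]
      · ring
      · exact hpn
      · omega

-- mod/div juggling used by pad_lsb
theorem emod_mul_div (n P : Int) : n % (8 * P) / 8 = n / 8 % P := by
  have hq : n / 8 / P = n / (8 * P) := Int.ediv_ediv_of_nonneg (by norm_num)
  have h1 : n % (8 * P) = n + 8 * (-(P * (n / (8 * P)))) := by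
    rw [Int.emod_def]; ring
  rw [h1, Int.add_mul_ediv_left _ _ (by norm_num : (8:Int) ≠ 0), ← hq, Int.emod_def]
  ring

-- LSB decomposition of the MSB-first pad
theorem pad_lsb (k : Nat) : ∀ (n : Int), pad (k + 1) n = pad k (n / 8) ++ [n % 8] := by
  induction k with
  | zero =>
    intro n
    simp [pad, pow_succ]
  | succ k ih =>
    intro n
    have hpow : (8:Int) ^ (k + 2) = 8 * 8 ^ (k + 1) := by ring
    have hmm : n % 8 ^ (k + 2) % 8 = n % 8 := by
      rw [hpow]; exact Int.emod_emod_of_dvd n ⟨8 ^ (k + 1), rfl⟩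
    have hdd : n / 8 / 8 ^ (k + 1) = n / 8 ^ (k + 2) := by
      rw [Int.ediv_ediv_of_nonneg (by norm_num), ← hpow]
    have hkey : n % 8 ^ (k + 2) / 8 = n / 8 % 8 ^ (k + 1) := by
      rw [hpow]; exact emod_mul_div n _
    calc pad (k + 2) n
        = n / 8 ^ (k + 2) :: pad (k + 1) (n % 8 ^ (k + 2)) := rfl
      _ = n / 8 ^ (k + 2) :: (pad k (n % 8 ^ (k + 2) / 8) ++ [n % 8 ^ (k + 2) % 8]) := by
          rw [ih]
      _ = pad (k + 1) (n / 8) ++ [n % 8] := by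
          rw [hmm, hkey, ← hdd]
          simp [pad]

-- msd equals the exact-width pad when 8^k ≤ n < 8^(k+1)
theorem msd_pad (k : Nat) : ∀ (n : Int), 8 ^ k ≤ n → n < 8 ^ (k + 1) → msd n = pad k n := by
  induction k with
  | zero =>
    intro n h1 h2
    norm_num at h1 h2
    rw [msd, if_neg (by omega)]
    have hd : n / 8 = 0 := by omega
    have hm : n % 8 = n := by omega
    rw [hd, msd, if_pos (by norm_num), hm]
    simp [pad]
  | succ k ih =>
    intro n h1 h2
    have hP : (0:Int) < 8 ^ k := by positivity
    have hb1 : (8:Int) ^ (k + 1) = 8 ^ k * 8 := by ring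
    have hb2 : (8:Int) ^ (k + 2) = 8 ^ (k + 1) * 8 := by ring
    have hl : 8 ^ k ≤ n / 8 := by
      rw [Int.le_ediv_iff_mul_le (by norm_num : (0:Int) < 8)]
      omega
    have hr : n / 8 < 8 ^ (k + 1) := by
      rw [Int.ediv_lt_iff_lt_mul (by norm_num : (0:Int) < 8)]
      omega
    rw [msd, if_neg (by omega), ih _ hl hr, ← pad_lsb]

-- the digit loop at p = 8^k produces pad k n whenever the fuel dominates k
theorem dig_pad (k : Nat) : ∀ (fuel : Nat), k + 1 < fuel → ∀ (n : Int) (acc : List Int), 0 ≤ n →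
    decimal_num_dig fuel n (8 ^ k) acc = acc ++ pad k n := by
  induction k with
  | zero =>
    intro fuel hf n acc hn
    obtain ⟨f, rfl⟩ : ∃ f, fuel = f + 1 := ⟨fuel - 1, by omega⟩
    rw [pow_zero, decimal_num_dig, if_pos (by norm_num)]
    obtain ⟨g, rfl⟩ : ∃ g, f = g + 1 := ⟨f - 1, by omega⟩
    rw [decimal_num_dig]
    have : ¬ (1:Int) ≤ PySem.Int.floordiv 1 8 := by
      rw [PySem.Int.floordiv_eq_ediv_of_pos (by norm_num)]; decide
    rw [if_neg this]
    simp [pad, PySem.Int.floordiv]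
  | succ k ih =>
    intro fuel hf n acc hn
    obtain ⟨f, rfl⟩ : ∃ f, fuel = f + 1 := ⟨fuel - 1, by omega⟩
    have hP : (0:Int) < 8 ^ (k + 1) := by positivity
    rw [decimal_num_dig, if_pos (by omega)]
    have hfd : PySem.Int.floordiv ((8:Int) ^ (k + 1)) 8 = 8 ^ k := by
      rw [PySem.Int.floordiv_eq_ediv_of_pos (by norm_num), pow_succ,
        Int.mul_ediv_cancel _ (by norm_num)]
    have hm : PySem.Int.mod n (8 ^ (k + 1)) = n % 8 ^ (k + 1) :=
      PySem.Int.mod_eq_emod_of_pos hP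
    have hd : PySem.Int.floordiv n (8 ^ (k + 1)) = n / 8 ^ (k + 1) :=
      PySem.Int.floordiv_eq_ediv_of_pos hP
    rw [hfd, hm, hd, ih f (by omega) _ _ (Int.emod_nonneg n (by positivity))]
    simp [pad]

-- k + 1 ≤ 8^k, to show the digit loop's fuel dominates the digit count
theorem succ_le_pow (k : Nat) : k + 1 ≤ 8 ^ k := Nat.lt_pow_self (by norm_num)

-- ===== VERDICT =====
theorem decimal_num_spec : Claim_equal_decimal_num := by
  intro n _
  show decimal_num n = decimal_num_alt n
  have hA : decimal_num n = msd n := by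
    have h := loop_reverse (n.toNat + 1) n (by omega) []
    simpa [decimal_num] using h
  rw [hA, decimal_num_alt]
  by_cases h : n ≤ 0
  · rw [if_pos h, msd, if_pos h]
  · rw [if_neg h]
    obtain ⟨k, hk, hle, hlt⟩ := pow_spec (n.toNat + 1) n 1 (by omega) (by norm_num) (by omega)
    rw [one_mul] at hk
    simp only [hk]
    have hpk : ((8:Int) ^ k).toNat = 8 ^ k := by
      have hc : ((8:Int) ^ k) = ((8 ^ k : Nat) : Int) := by push_cast; ring
      rw [hc, Int.toNat_natCast]
    have hfuel : k + 1 < ((8:Int) ^ k).toNat + 1 := by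
      rw [hpk]; have := succ_le_pow k; omega
    rw [dig_pad k _ hfuel n [] (by omega),
      msd_pad k n (by omega) (by rw [pow_succ]; omega)]
    simp
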